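-- pv_equiv track=rewrite | github.com/LuanoRodrigues/3Cs-attribution-Framework | Research/systematic_review_pipeline.py | _filter_reference_records_by_item_keys
-- ===== SOURCE A (Python) =====
-- def _filter_reference_records_by_item_keys(
--     records: list[dict[str, str]],
--     anchor_item_keys: list[str] | None,
-- ) -> list[dict[str, str]]:
--     if anchor_item_keys is None:
--         return list(records)
--     by_key: dict[str, dict[str, str]] = {}
--     for rec in records:
--         if not isinstance(rec, dict):
--             continue
--         key = str(rec.get("item_key") or "").strip().lower()
--         if key and key not in by_key:
--             by_key[key] = rec
--     out: list[dict[str, str]] = []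
--     seen: set[str] = set()
--     for raw_key in anchor_item_keys:
--         key = str(raw_key or "").strip().lower()
--         if not key or key in seen:
--             continue
--         seen.add(key)
--         rec = by_key.get(key)
--         if isinstance(rec, dict):
--             out.append(rec)
--     return out
-- ===== SOURCE B (Python) =====
-- def _filter_reference_records_by_item_keys(records, anchor_item_keys):
--     if anchor_item_keys is None:
--         return list(records)
--     # position of each distinct normalized anchor key in first-occurrence order
--     pos = {}
--     for raw_key in anchor_item_keys:
--         key = str(raw_key or "").strip().lower()
--         if key and key not in pos:
--             pos[key] = len(pos)
--     # one scan over records: first record per anchor position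
--     hits = {}
--     for rec in records:
--         if not isinstance(rec, dict):
--             continue
--         i = pos.get(str(rec.get("item_key") or "").strip().lower())
--         if i is not None and i not in hits:
--             hits[i] = rec
--     # emit by ascending anchor position
--     return [hits[i] for i in sorted(hits)]
-- ===== Notes on version B (the rewrite author's own statement) =====
-- stated objective: alternative
-- what changed: B inverts the data flow: it indexes the deduplicated normalized anchor keys by their position, makes a single scan over records assigning each anchor position its first matching record, and assembles the output by sorting the hit positions, instead of A's record-keyed index consulted while iterating the anchor keys.
import Mathlib
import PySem

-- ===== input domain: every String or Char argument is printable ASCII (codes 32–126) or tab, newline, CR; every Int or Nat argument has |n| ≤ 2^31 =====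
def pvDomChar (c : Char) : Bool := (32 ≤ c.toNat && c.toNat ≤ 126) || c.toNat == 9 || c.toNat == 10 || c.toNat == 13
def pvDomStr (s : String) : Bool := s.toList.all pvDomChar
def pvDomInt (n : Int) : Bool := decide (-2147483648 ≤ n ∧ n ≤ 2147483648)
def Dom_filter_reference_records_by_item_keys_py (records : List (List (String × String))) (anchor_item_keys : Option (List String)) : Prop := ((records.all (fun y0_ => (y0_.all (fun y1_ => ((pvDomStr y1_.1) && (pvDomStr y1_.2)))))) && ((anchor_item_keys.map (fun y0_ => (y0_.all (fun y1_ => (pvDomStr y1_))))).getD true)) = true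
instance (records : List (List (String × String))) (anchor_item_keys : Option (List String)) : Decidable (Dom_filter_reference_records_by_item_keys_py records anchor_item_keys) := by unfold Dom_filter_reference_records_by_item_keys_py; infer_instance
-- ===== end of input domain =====

-- B inverts the data flow: it maps each distinct normalized anchor key to its position,
-- scans the records once assigning each position its first matching record, and emits the
-- hits sorted by position — instead of A's record-keyed index consulted per anchor key
-- (alternative structure, same cost class).

-- shared normalization: str(x or "").strip().lower()
def pvNorm (s : String) : String := PySem.Str.lower (PySem.Str.strip s)

-- str(rec.get("item_key") or "").strip().lower()
def pvNormKey (rec : List (String × String)) : String :=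
  pvNorm ((PySem.Dict.mk rec).getD "item_key" "")

-- ===== PORT A =====
def pvBuildStep (d : PySem.Dict String (List (String × String))) (rec : List (String × String)) :
    PySem.Dict String (List (String × String)) :=
  let key := pvNormKey rec
  if key ≠ "" ∧ ¬ d.contains key then d.insert key rec else d

def pvALoop (by_key : PySem.Dict String (List (String × String)))
    (st : List (List (String × String)) × PySem.Set String) (raw_key : String) :
    List (List (String × String)) × PySem.Set String :=
  -- key = str(raw_key or "").strip().lower()  (raw_key or "" = raw_key on strings)
  let key := pvNorm raw_key
  if key = "" ∨ key ∈ st.2 then st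
  else
    let seen := PySem.Set.add st.2 key
    match by_key.get? key with
    | some rec => (st.1 ++ [rec], seen)
    | none => (st.1, seen)

def filter_reference_records_by_item_keys_py (records : List (List (String × String))) (anchor_item_keys : Option (List String)) : List (List (String × String)) :=
  match anchor_item_keys with
  | none => records
  | some ks =>
    let by_key := records.foldl pvBuildStep PySem.Dict.empty
    (ks.foldl (pvALoop by_key) ([], [])).1

-- ===== PORT B =====
-- pass 1: pos[key] = len(pos) for each new nonempty normalized anchor key
def pvPosStep (d : PySem.Dict String Nat) (raw_key : String) : PySem.Dict String Nat :=
  let key := pvNorm raw_key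
  if key ≠ "" ∧ ¬ d.contains key then d.insert key d.size else d

-- pass 2: i = pos.get(key); if i is not None and i not in hits: hits[i] = rec
def pvHitsStep (pos : PySem.Dict String Nat) (h : PySem.Dict Nat (List (String × String)))
    (rec : List (String × String)) : PySem.Dict Nat (List (String × String)) :=
  match pos.get? (pvNormKey rec) with
  | some i => if ¬ h.contains i then h.insert i rec else h
  | none => h

def filter_reference_records_by_item_keys_py_alt (records : List (List (String × String))) (anchor_item_keys : Option (List String)) : List (List (String × String)) :=
  match anchor_item_keys with
  | none => records
  | some ks =>
    let pos := ks.foldl pvPosStep PySem.Dict.empty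
    let hits := records.foldl (pvHitsStep pos) PySem.Dict.empty
    -- [hits[i] for i in sorted(hits)]; every i in hits.keys is present, so getD is exact
    (PySem.List.sorted hits.keys (fun i => i) false).map (fun i => hits.getD i [])

-- ===== PRECONDITION & SPEC =====
def Spec_filter_reference_records_by_item_keys_py (records : List (List (String × String))) (anchor_item_keys : Option (List String)) (out : List (List (String × String))) : Prop := out = filter_reference_records_by_item_keys_py_alt records anchor_item_keys
instance (records : List (List (String × String))) (anchor_item_keys : Option (List String)) (out : List (List (String × String))) : Decidable (Spec_filter_reference_records_by_item_keys_py records anchor_item_keys out) := by unfold Spec_filter_reference_records_by_item_keys_py; infer_instance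

-- ===== CLAIM (what is proved, stated in full; the proofs are below) =====
def Claim_equal_filter_reference_records_by_item_keys_py : Prop := ∀ (records : List (List (String × String))) (anchor_item_keys : Option (List String)), Dom_filter_reference_records_by_item_keys_py records anchor_item_keys → Spec_filter_reference_records_by_item_keys_py records anchor_item_keys (filter_reference_records_by_item_keys_py records anchor_item_keys)

-- ===== LEMMAS AND PROOFS =====

-- the deduplicated nonempty normalized anchor keys, in first-occurrence order, given keys already seen
def pvDk (seen : List String) : List String → List String
  | [] => []
  | r :: rest =>
    if pvNorm r = "" ∨ pvNorm r ∈ seen then pvDk seen rest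
    else pvNorm r :: pvDk (pvNorm r :: seen) rest

theorem pvDk_congr (s1 s2 : List String) (l : List String) (h : ∀ x, x ∈ s1 ↔ x ∈ s2) :
    pvDk s1 l = pvDk s2 l := by
  induction l generalizing s1 s2 with
  | nil => rfl
  | cons r rest ih =>
    simp only [pvDk]
    by_cases hk : pvNorm r = "" ∨ pvNorm r ∈ s1
    · rw [if_pos hk, if_pos (by rcases hk with h' | h'; exact Or.inl h'; exact Or.inr ((h _).mp h')),
        ih _ _ h]
    · rw [if_neg hk, if_neg (by rintro (h' | h'); exact hk (Or.inl h'); exact hk (Or.inr ((h _).mpr h'))),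
        ih (pvNorm r :: s1) (pvNorm r :: s2) (by intro x; simp [h x])]

theorem pvDk_prop (seen : List String) (l : List String) :
    (pvDk seen l).Nodup ∧ ∀ k ∈ pvDk seen l, k ≠ "" ∧ k ∉ seen := by
  induction l generalizing seen with
  | nil => simp [pvDk]
  | cons r rest ih =>
    simp only [pvDk]
    by_cases hk : pvNorm r = "" ∨ pvNorm r ∈ seen
    · rw [if_pos hk]; exact ih seen
    · rw [if_neg hk]
      push_neg at hk
      obtain ⟨hnd, hmem⟩ := ih (pvNorm r :: seen)
      refine ⟨List.nodup_cons.mpr ⟨fun hc => ((hmem _ hc).2 (List.mem_cons_self)), hnd⟩, ?_⟩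
      intro k hkmem
      rcases List.mem_cons.mp hkmem with rfl | hkmem
      · exact ⟨hk.1, hk.2⟩
      · obtain ⟨h1, h2⟩ := hmem k hkmem
        exact ⟨h1, fun hc => h2 (List.mem_cons_of_mem _ hc)⟩

-- A's index lookup equals the linear first-match scan.
theorem pvBuild_get? (records : List (List (String × String))) (key : String)
    (d : PySem.Dict String (List (String × String))) (hk : key ≠ "") :
    (records.foldl pvBuildStep d).get? key =
      (d.get? key).or (records.find? (fun rec => pvNormKey rec == key)) := by
  induction records generalizing d with
  | nil => simp
  | cons rec rest ih =>
    simp only [List.foldl_cons, List.find?_cons, ih]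
    unfold pvBuildStep
    by_cases hkey : pvNormKey rec = key
    · subst hkey
      simp only [beq_self_eq_true]
      by_cases hc : d.contains (pvNormKey rec)
      · have hs : (d.get? (pvNormKey rec)).isSome := by
          rw [← PySem.Dict.contains_eq_isSome_get?]; exact hc
        obtain ⟨v, hv⟩ := Option.isSome_iff_exists.mp hs
        simp [hk, hc, hv]
      · have hn : d.get? (pvNormKey rec) = none := by
          rw [PySem.Dict.get?_eq_none_iff_contains]
          simpa using hc
        simp [hk, hc, hn, PySem.Dict.get?_insert_self]
    · have hb : (pvNormKey rec == key) = false := by simpa using hkey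
      simp only [hb]
      split_ifs with h
      · rw [PySem.Dict.get?_insert_of_ne]
        exact fun e => hkey e.symm
      · rfl

-- A's emit loop is filterMap of the index lookup over the deduplicated key list.
theorem pvALoop_eq (bk : PySem.Dict String (List (String × String))) (ks : List String)
    (out : List (List (String × String))) (seenS : PySem.Set String) (seenL : List String)
    (h : ∀ k, k ∈ seenS ↔ k ∈ seenL) :
    (ks.foldl (pvALoop bk) (out, seenS)).1 = out ++ (pvDk seenL ks).filterMap bk.get? := by
  induction ks generalizing out seenS seenL with
  | nil => simp [pvDk]
  | cons raw rest ih =>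
    simp only [List.foldl_cons, pvDk]
    by_cases hskip : pvNorm raw = "" ∨ pvNorm raw ∈ seenL
    · have hskipS : pvNorm raw = "" ∨ pvNorm raw ∈ seenS := by
        rcases hskip with h' | h'; exact Or.inl h'; exact Or.inr ((h _).mpr h')
      have hstep : pvALoop bk (out, seenS) raw = (out, seenS) := by
        unfold pvALoop; simp only [if_pos hskipS]
      rw [hstep, if_pos hskip]
      exact ih out seenS seenL h
    · have hskipS : ¬ (pvNorm raw = "" ∨ pvNorm raw ∈ seenS) := by
        rintro (h' | h'); exact hskip (Or.inl h'); exact hskip (Or.inr ((h _).mp h'))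
      have hmem : ∀ k, k ∈ PySem.Set.add seenS (pvNorm raw) ↔ k ∈ pvNorm raw :: seenL := by
        intro k
        rw [PySem.Set.mem_add, List.mem_cons]
        constructor
        · rintro (h' | rfl); exact Or.inr ((h _).mp h'); exact Or.inl rfl
        · rintro (rfl | h'); exact Or.inr rfl; exact Or.inl ((h _).mpr h')
      rw [if_neg hskip]
      cases hget : bk.get? (pvNorm raw) with
      | some rec =>
        have hstep : pvALoop bk (out, seenS) raw = (out ++ [rec], PySem.Set.add seenS (pvNorm raw)) := by
          unfold pvALoop; simp only [if_neg hskipS, hget]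
        rw [hstep, ih _ _ _ hmem, List.filterMap_cons, hget]
        simp
      | none =>
        have hstep : pvALoop bk (out, seenS) raw = (out, PySem.Set.add seenS (pvNorm raw)) := by
          unfold pvALoop; simp only [if_neg hskipS, hget]
        rw [hstep, ih _ _ _ hmem, List.filterMap_cons, hget]

-- the canonical value both ports compute
theorem pvA_canon (records : List (List (String × String))) (ks : List String) :
    filter_reference_records_by_item_keys_py records (some ks) =
      (pvDk [] ks).filterMap (fun k => records.find? (fun rec => pvNormKey rec == k)) := by
  show (ks.foldl (pvALoop (records.foldl pvBuildStep PySem.Dict.empty)) ([], [])).1 = _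
  rw [pvALoop_eq _ ks [] [] [] (by simp [PySem.Set.empty])]
  simp only [List.nil_append]
  apply List.filterMap_congr
  intro k hkmem
  rw [pvBuild_get? records k PySem.Dict.empty ((pvDk_prop [] ks).2 k hkmem).1]
  simp

-- B pass 1: the position dict is the index into the deduplicated key list.
theorem pvPos_get (ks : List String) (d : PySem.Dict String Nat) (k : String) :
    (ks.foldl pvPosStep d).get? k =
      (d.get? k).or ((List.idxOf? k (pvDk d.keys ks)).map (fun i => d.size + i)) := by
  induction ks generalizing d with
  | nil => simp [pvDk]
  | cons raw rest ih =>
    simp only [List.foldl_cons, pvDk]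
    by_cases hskip : pvNorm raw = "" ∨ pvNorm raw ∈ d.keys
    · have hc : (pvPosStep d raw) = d := by
        unfold pvPosStep
        rcases hskip with h' | h'
        · simp [h']
        · have : d.contains (pvNorm raw) := (PySem.Dict.contains_iff_mem_keys d _).mpr h'
          simp [this]
      rw [hc, if_pos hskip, ih]
    · push_neg at hskip
      have hnc : ¬ d.contains (pvNorm raw) := fun hc => hskip.2 ((PySem.Dict.contains_iff_mem_keys d _).mp hc)
      have hstep : pvPosStep d raw = d.insert (pvNorm raw) d.size := by
        unfold pvPosStep; simp [hskip.1, hnc]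
      rw [hstep, if_neg (by rintro (h' | h'); exact hskip.1 h'; exact hskip.2 h'), ih]
      have hkeys : (d.insert (pvNorm raw) d.size).keys = d.keys ++ [pvNorm raw] :=
        PySem.Dict.keys_insert_of_not_contains d d.size (by simpa using hnc)
      have hdk : pvDk (d.insert (pvNorm raw) d.size).keys rest = pvDk (pvNorm raw :: d.keys) rest := by
        rw [hkeys]; exact pvDk_congr _ _ rest (by intro x; simp [or_comm])
      rw [hdk]
      have hsize : (d.insert (pvNorm raw) d.size).size = d.size + 1 := by
        simp [PySem.Dict.size, PySem.Dict.keys] at hkeys ⊢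
        have := congrArg List.length hkeys
        simpa using this
      by_cases hk : pvNorm raw = k
      · subst hk
        rw [PySem.Dict.get?_insert_self]
        have hd : d.get? (pvNorm raw) = none := by
          rw [PySem.Dict.get?_eq_none_iff_contains]; simpa using hnc
        simp [hd, List.idxOf?, List.findIdx?_cons]
      · rw [PySem.Dict.get?_insert_of_ne _ _ (fun e => hk e.symm)]
        cases hd : d.get? k with
        | some v => simp [hd]
        | none =>
          have hbeq : (pvNorm raw == k) = false := by simpa using hk
          simp only [hd, Option.none_or, List.idxOf?, List.findIdx?_cons, hbeq, cond_false,
            hsize]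
          cases List.findIdx? (fun a => a == k) (pvDk (pvNorm raw :: d.keys) rest) with
          | none => simp
          | some i => simp; omega

theorem pvPos_get_empty (ks : List String) (k : String) :
    (ks.foldl pvPosStep PySem.Dict.empty).get? k = List.idxOf? k (pvDk [] ks) := by
  rw [pvPos_get]
  simp [PySem.Dict.get?_empty, PySem.Dict.size_empty, PySem.Dict.keys_empty]

-- characterize pos lookups via positions in the nodup list K
theorem pvPos_get_iff (ks : List String) (k : String) (i : Nat) :
    (ks.foldl pvPosStep PySem.Dict.empty).get? k = some i ↔
      ∃ h : i < (pvDk [] ks).length, (pvDk [] ks)[i] = k := by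
  rw [pvPos_get_empty, List.idxOf?_eq_some_iff]
  constructor
  · rintro ⟨h, h1, _⟩; exact ⟨h, h1⟩
  · rintro ⟨h, h1⟩
    refine ⟨h, h1, ?_⟩
    intro j hj hc
    have hnd := (pvDk_prop [] ks).1
    have : j = i := by
      have := List.Nodup.getElem_inj_iff hnd (i := j) (j := i) (hi := by omega) (hj := h)
      exact this.mp (hc.trans h1.symm)
    omega

-- B pass 2: keys of the hits dict stay unique
theorem pvHits_nodup (pos : PySem.Dict String Nat) (records : List (List (String × String)))
    (h : PySem.Dict Nat (List (String × String))) (hnd : h.keys.Nodup) :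
    ((records.foldl (pvHitsStep pos) h).keys).Nodup := by
  induction records generalizing h with
  | nil => exact hnd
  | cons rec rest ih =>
    simp only [List.foldl_cons]
    apply ih
    unfold pvHitsStep
    cases pos.get? (pvNormKey rec) with
    | some i =>
      by_cases hc : h.contains i
      · simpa [hc]
      · simpa [hc] using PySem.Dict.nodup_keys_insert h i rec hnd
    | none => exact hnd

-- B pass 2: lookup in the hits dict is the first record mapped to that position.
theorem pvHits_get (pos : PySem.Dict String Nat) (records : List (List (String × String)))
    (h : PySem.Dict Nat (List (String × String))) (i : Nat) :
    (records.foldl (pvHitsStep pos) h).get? i =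
      (h.get? i).or (records.find? (fun rec => pos.get? (pvNormKey rec) == some i)) := by
  induction records generalizing h with
  | nil => simp
  | cons rec rest ih =>
    simp only [List.foldl_cons, List.find?_cons, ih]
    unfold pvHitsStep
    cases hp : pos.get? (pvNormKey rec) with
    | none => simp
    | some j =>
      by_cases hj : j = i
      · subst hj
        simp only [beq_self_eq_true]
        by_cases hc : h.contains j
        · have hs : (h.get? j).isSome := by rw [← PySem.Dict.contains_eq_isSome_get?]; exact hc
          obtain ⟨v, hv⟩ := Option.isSome_iff_exists.mp hs
          simp [hc, hv]
        · have hn : h.get? j = none := by rw [PySem.Dict.get?_eq_none_iff_contains]; simpa using hc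
          simp [hc, hn, PySem.Dict.get?_insert_self]
      · have hb : (some j == some i) = false := by simpa using hj
        simp only [hb, cond_false]
        by_cases hc : h.contains j
        · simp [hc]
        · rw [if_pos (by simp [hc]), PySem.Dict.get?_insert_of_ne _ _ (fun e => hj e.symm)]

-- filter-then-index-map is filterMap
theorem pvFilterMap_getD (l : List Nat) (F : Nat → Option (List (String × String))) :
    (l.filter (fun i => (F i).isSome)).map (fun i => (F i).getD []) = l.filterMap F := by
  induction l with
  | nil => rfl
  | cons a t ih =>
    cases hF : F a with
    | none => simp [List.filter_cons, List.filterMap_cons, hF, ih]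
    | some v => simp [List.filter_cons, List.filterMap_cons, hF, ih]

-- filterMap over indices is filterMap over the list
theorem pvFilterMap_range (K : List String) (f : String → Option (List (String × String))) :
    (List.range K.length).filterMap (fun i => f K[i]!) = K.filterMap f := by
  induction K with
  | nil => rfl
  | cons a K ih =>
    rw [List.length_cons, List.range_succ_eq_map, List.filterMap_cons, List.filterMap_map]
    have : ((fun i => f (a :: K)[i]!) ∘ Nat.succ) = fun i => f K[i]! := by
      funext i; simp [List.getElem!_cons_succ]
    rw [List.filterMap_cons]
    simp only [List.getElem!_cons_zero, this, ih]

-- emit phase, abstractly: sorted-keys lookup of a dict whose lookups are F, with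
-- positions bounded by K and agreeing with f on K, is filterMap f over K
theorem pvEmit (K : List String) (hits : PySem.Dict Nat (List (String × String)))
    (F : Nat → Option (List (String × String))) (f : String → Option (List (String × String)))
    (hnd : hits.keys.Nodup)
    (hget : ∀ i, hits.get? i = F i)
    (hbound : ∀ i, (F i).isSome → i < K.length)
    (hFK : ∀ i, i < K.length → F i = f K[i]!) :
    (PySem.List.sorted hits.keys (fun i => i) false).map (fun i => hits.getD i []) =
      K.filterMap f := by
  have hsorted : PySem.List.sorted hits.keys (fun i => i) false =
      (List.range K.length).filter (fun i => (F i).isSome) := by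
    apply PySem.List.sorted_eq_of_perm_of_pairwise_lt
    · rw [List.perm_ext_iff_of_nodup (List.Nodup.filter _ List.nodup_range) hnd]
      intro i
      rw [List.mem_filter, List.mem_range]
      have hmemkeys : i ∈ hits.keys ↔ (hits.get? i).isSome := by
        rw [← PySem.Dict.contains_iff_mem_keys, PySem.Dict.contains_eq_isSome_get?]
      rw [hmemkeys, hget]
      exact ⟨fun ⟨_, hs⟩ => hs, fun hs => ⟨hbound i hs, hs⟩⟩
    · exact List.Pairwise.filter _ List.pairwise_lt_range
  rw [hsorted]
  calc ((List.range K.length).filter (fun i => (F i).isSome)).map (fun i => hits.getD i [])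
      = ((List.range K.length).filter (fun i => (F i).isSome)).map (fun i => (F i).getD []) := by
        apply List.map_congr_left
        intro i _
        rw [PySem.Dict.getD_eq_get?_getD, hget]
    _ = (List.range K.length).filterMap F := pvFilterMap_getD _ F
    _ = (List.range K.length).filterMap (fun i => f K[i]!) :=
        List.filterMap_congr (fun i hi => hFK i (List.mem_range.mp hi))
    _ = K.filterMap f := pvFilterMap_range K f

set_option maxHeartbeats 1600000 in
theorem pvB_canon (records : List (List (String × String))) (ks : List String) :
    filter_reference_records_by_item_keys_py_alt records (some ks) =
      (pvDk [] ks).filterMap (fun k => records.find? (fun rec => pvNormKey rec == k)) := by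
  show (PySem.List.sorted (records.foldl (pvHitsStep (ks.foldl pvPosStep PySem.Dict.empty)) PySem.Dict.empty).keys (fun i => i) false).map
      (fun i => (records.foldl (pvHitsStep (ks.foldl pvPosStep PySem.Dict.empty)) PySem.Dict.empty).getD i []) = _
  apply pvEmit (pvDk [] ks)
    (records.foldl (pvHitsStep (ks.foldl pvPosStep PySem.Dict.empty)) PySem.Dict.empty)
    (fun i => records.find? (fun rec => (ks.foldl pvPosStep PySem.Dict.empty).get? (pvNormKey rec) == some i))
  · exact pvHits_nodup _ records PySem.Dict.empty (by simp [PySem.Dict.keys_empty])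
  · intro i
    rw [pvHits_get]
    simp
  · intro i hs
    obtain ⟨rec, hrec⟩ := Option.isSome_iff_exists.mp hs
    have hp : (ks.foldl pvPosStep PySem.Dict.empty).get? (pvNormKey rec) = some i := by
      simpa using List.find?_some hrec
    obtain ⟨h, _⟩ := (pvPos_get_iff ks _ i).mp hp
    exact h
  · intro i hi
    have hpred : (fun rec => ((ks.foldl pvPosStep PySem.Dict.empty).get? (pvNormKey rec) == some i)) =
        (fun rec => (pvNormKey rec == (pvDk [] ks)[i]!)) := by
      funext rec
      rw [getElem!_pos (pvDk [] ks) i hi]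
      by_cases he : pvNormKey rec = (pvDk [] ks)[i]
      · rw [he]
        have hp : (ks.foldl pvPosStep PySem.Dict.empty).get? (pvDk [] ks)[i] = some i :=
          (pvPos_get_iff ks _ i).mpr ⟨hi, rfl⟩
        simp [hp]
      · have hne : (ks.foldl pvPosStep PySem.Dict.empty).get? (pvNormKey rec) ≠ some i := by
          intro hc
          obtain ⟨_, hKi⟩ := (pvPos_get_iff ks _ i).mp hc
          exact he hKi.symm
        simp [hne, he]
    rw [hpred]

-- ===== VERDICT (by name: the statement is the Claim_ definition above) =====
theorem filter_reference_records_by_item_keys_py_spec : Claim_equal_filter_reference_records_by_item_keys_py := by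
  intro records anchor_item_keys _
  unfold Spec_filter_reference_records_by_item_keys_py
  cases anchor_item_keys with
  | none => rfl
  | some ks => rw [pvA_canon, pvB_canon]
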